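-- pv_equiv track=rewrite | github.com/brishar0n/Forum_Week9_OS | main.py | cscan
-- ===== SOURCE A (Python) =====
-- def cscan(requests, initial_position, total_cylinders):
--     total_movement = 0
--     head_position = initial_position
--
--     requests_above = [req for req in requests if req >= initial_position]
--     requests_below = [req for req in requests if req < initial_position]
--
--     for request in requests_above:
--         total_movement += abs(request - head_position)
--         head_position = request
--
--     if requests_below:
--         total_movement += total_cylinders - 1 - head_position
--         total_movement += total_cylinders - 1
--         head_position = 0
--
--         for request in requests_below:
--             total_movement += abs(request - head_position)
--             head_position = request
--
--     return total_movement
-- ===== SOURCE B (Python) =====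
-- def cscan(requests, initial_position, total_cylinders):
--     # Single pass: no partition lists are built; both sweep costs are
--     # accumulated simultaneously while scanning the requests once.
--     up = 0
--     up_head = initial_position
--     down = 0
--     down_head = None  # None = no below-request seen yet (downward sweep starts at 0)
--     for r in requests:
--         if r >= initial_position:
--             up += abs(r - up_head)
--             up_head = r
--         else:
--             down += abs(r - (0 if down_head is None else down_head))
--             down_head = r
--     if down_head is None:
--         return up
--     return up + (total_cylinders - 1 - up_head) + (total_cylinders - 1) + down
-- ===== Notes on version B (the rewrite author's own statement) =====
-- stated objective: alternative
-- what changed: Replaces A's partition-into-two-lists-then-two-loops structure by one single pass over the requests that accumulates the upward and downward sweep costs simultaneously in separate accumulators (no intermediate lists are built), combining them arithmetically at the end.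
import Mathlib
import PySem

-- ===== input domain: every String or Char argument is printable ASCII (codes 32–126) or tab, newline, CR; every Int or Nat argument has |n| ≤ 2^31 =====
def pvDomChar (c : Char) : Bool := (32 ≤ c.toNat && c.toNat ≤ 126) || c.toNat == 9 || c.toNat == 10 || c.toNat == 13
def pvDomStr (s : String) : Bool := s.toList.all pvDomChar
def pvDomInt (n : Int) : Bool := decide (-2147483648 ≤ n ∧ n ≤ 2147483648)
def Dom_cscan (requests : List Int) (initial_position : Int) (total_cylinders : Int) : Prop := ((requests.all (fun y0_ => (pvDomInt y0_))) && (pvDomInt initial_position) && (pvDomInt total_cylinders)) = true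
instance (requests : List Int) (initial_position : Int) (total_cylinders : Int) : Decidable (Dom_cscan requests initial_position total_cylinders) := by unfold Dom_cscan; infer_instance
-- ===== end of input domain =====

-- B replaces A's partition-then-two-loops by one single pass accumulating both sweep costs at once; objective: alternative (same O(n) cost).


-- ===== PORT A =====
def cscan (requests : List Int) (initial_position : Int) (total_cylinders : Int) : Int :=
  let requests_above := requests.filter (fun req => req ≥ initial_position)
  let requests_below := requests.filter (fun req => req < initial_position)
  let s1 := requests_above.foldl (fun (s : Int × Int) request => (s.1 + |request - s.2|, request)) (0, initial_position)
  if requests_below.isEmpty then s1.1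
  else
    let s2 := requests_below.foldl (fun (s : Int × Int) request => (s.1 + |request - s.2|, request))
      (s1.1 + (total_cylinders - 1 - s1.2) + (total_cylinders - 1), 0)
    s2.1

-- ===== PORT B =====
-- one step of B's single pass: state = (up, up_head, down, down_head?)
def cscanStep (initial_position : Int) (s : Int × Int × Int × Option Int) (r : Int) :
    Int × Int × Int × Option Int :=
  if r ≥ initial_position then (s.1 + |r - s.2.1|, r, s.2.2)
  else (s.1, s.2.1, s.2.2.1 + |r - (s.2.2.2.getD 0)|, some r)

def cscan_alt (requests : List Int) (initial_position : Int) (total_cylinders : Int) : Int :=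
  let s := requests.foldl (cscanStep initial_position) (0, initial_position, 0, none)
  match s.2.2.2 with
  | none => s.1
  | some _ => s.1 + (total_cylinders - 1 - s.2.1) + (total_cylinders - 1) + s.2.2.1

-- ===== PRECONDITION & SPEC =====
def Spec_cscan (requests : List Int) (initial_position : Int) (total_cylinders : Int) (out : Int) : Prop := out = cscan_alt requests initial_position total_cylinders
instance (requests : List Int) (initial_position : Int) (total_cylinders : Int) (out : Int) : Decidable (Spec_cscan requests initial_position total_cylinders out) := by unfold Spec_cscan; infer_instance

-- ===== CLAIM (what is proved, stated in full; the proofs are below) =====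
def Claim_equal_cscan : Prop := ∀ (requests : List Int) (initial_position : Int) (total_cylinders : Int), Dom_cscan requests initial_position total_cylinders → Spec_cscan requests initial_position total_cylinders (cscan requests initial_position total_cylinders)

-- ===== LEMMAS AND PROOFS =====

-- A's (sum, head) loop computes sum + path cost and the last stop.
theorem foldl_pair (xs : List Int) (t h : Int) :
    xs.foldl (fun (s : Int × Int) r => (s.1 + |r - s.2|, r)) (t, h)
      = (t + (xs.foldl (fun (s : Int × Int) r => (s.1 + |r - s.2|, r)) (0, h)).1,
         xs.getLastD h) := by
  induction xs generalizing t h with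
  | nil => simp
  | cons x rest ih =>
    simp only [List.foldl_cons, List.getLastD_cons]
    rw [ih, ih (0 + |x - h|) x]
    ring_nf

-- B's single pass over xs equals A's two staged folds over the two filtered lists,
-- provided the down-head is already `some h` (the Option is then just a tagged Int).
theorem foldl_split_some (ip : Int) (xs : List Int) (u uh d h : Int) :
    xs.foldl (cscanStep ip) (u, uh, d, some h)
      = (((xs.filter (fun r => r ≥ ip)).foldl
            (fun (s : Int × Int) r => (s.1 + |r - s.2|, r)) (u, uh)).1,
         ((xs.filter (fun r => r ≥ ip)).foldl
            (fun (s : Int × Int) r => (s.1 + |r - s.2|, r)) (u, uh)).2,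
         ((xs.filter (fun r => r < ip)).foldl
            (fun (s : Int × Int) r => (s.1 + |r - s.2|, r)) (d, h)).1,
         some ((xs.filter (fun r => r < ip)).foldl
            (fun (s : Int × Int) r => (s.1 + |r - s.2|, r)) (d, h)).2) := by
  induction xs generalizing u uh d h with
  | nil => simp
  | cons x rest ih =>
    by_cases hx : x ≥ ip
    · have hx' : ¬ x < ip := not_lt.mpr hx
      simp [cscanStep, hx, hx', ih]
    · have hx' : x < ip := lt_of_not_ge hx
      simp [cscanStep, hx, hx', ih]

-- same split when no below-request has been seen yet: the down state behaves
-- like A's below fold started at head 0, and the Option records emptiness.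
theorem foldl_split_none (ip : Int) (xs : List Int) (u uh : Int) :
    xs.foldl (cscanStep ip) (u, uh, 0, none)
      = (((xs.filter (fun r => r ≥ ip)).foldl
            (fun (s : Int × Int) r => (s.1 + |r - s.2|, r)) (u, uh)).1,
         ((xs.filter (fun r => r ≥ ip)).foldl
            (fun (s : Int × Int) r => (s.1 + |r - s.2|, r)) (u, uh)).2,
         ((xs.filter (fun r => r < ip)).foldl
            (fun (s : Int × Int) r => (s.1 + |r - s.2|, r)) (0, 0)).1,
         if (xs.filter (fun r => r < ip)).isEmpty then none
         else some ((xs.filter (fun r => r < ip)).foldl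
            (fun (s : Int × Int) r => (s.1 + |r - s.2|, r)) (0, 0)).2) := by
  induction xs generalizing u uh with
  | nil => simp
  | cons x rest ih =>
    by_cases hx : x ≥ ip
    · have hx' : ¬ x < ip := not_lt.mpr hx
      simp [cscanStep, hx, hx', ih]
    · have hx' : x < ip := lt_of_not_ge hx
      simp [cscanStep, hx, hx', foldl_split_some]

-- ===== VERDICT (by name: the statement is the Claim_ definition above) =====
theorem cscan_spec : Claim_equal_cscan := by
  intro requests ip tc _
  show cscan requests ip tc = cscan_alt requests ip tc
  unfold cscan cscan_alt
  rw [foldl_split_none]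
  by_cases hb : (requests.filter (fun r => r < ip)).isEmpty
  · simp [hb]
  · simp only [hb]
    rw [foldl_pair _ ((((requests.filter (fun r => r ≥ ip)).foldl
          (fun (s : Int × Int) r => (s.1 + |r - s.2|, r)) (0, ip)).1
          + (tc - 1 - ((requests.filter (fun r => r ≥ ip)).foldl
          (fun (s : Int × Int) r => (s.1 + |r - s.2|, r)) (0, ip)).2) + (tc - 1))) 0]
    simp
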